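-- pv_equiv track=rewrite | github.com/axelkjonsberg/Stair-Run | filters.py | filter_by_step_count
-- ===== SOURCE A (Python) =====
-- TOTAL_STEP_THRESHOLD_1 = 150
--
-- TOTAL_STEP_THRESHOLD_2 = 200
--
-- TOTAL_STEP_THRESHOLD_3 = 250
--
-- TOTAL_STEP_THRESHOLD_4 = 300
--
-- def filter_by_step_count(groups):
--     """
--     Filter groups of stairs by total step count into different categories.
--     """
--     categorized_stairs = {
--         "150-200": [],
--         "200-250": [],
--         "250-300": [],
--         "300plus": []
--     }
--
--     for group in groups:
--         total_steps = sum(step_count for _, step_count in group)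
--         if TOTAL_STEP_THRESHOLD_1 <= total_steps < TOTAL_STEP_THRESHOLD_2:
--             categorized_stairs["150-200"].extend(group)
--         elif TOTAL_STEP_THRESHOLD_2 <= total_steps < TOTAL_STEP_THRESHOLD_3:
--             categorized_stairs["200-250"].extend(group)
--         elif TOTAL_STEP_THRESHOLD_3 <= total_steps < TOTAL_STEP_THRESHOLD_4:
--             categorized_stairs["250-300"].extend(group)
--         elif total_steps >= TOTAL_STEP_THRESHOLD_4:
--             categorized_stairs["300plus"].extend(group)
--
--     return categorized_stairs
-- ===== SOURCE B (Python) =====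
-- def filter_by_step_count(groups):
--     """
--     Filter groups of stairs by total step count into different categories.
--     """
--     totaled = [(sum(step_count for _, step_count in group), group) for group in groups]
--     return {
--         key: [stair for total, group in totaled
--               if lo <= total and (hi is None or total < hi)
--               for stair in group]
--         for key, lo, hi in (
--             ("150-200", 150, 200),
--             ("200-250", 200, 250),
--             ("250-300", 250, 300),
--             ("300plus", 300, None),
--         )
--     }
-- ===== Notes on version B (the rewrite author's own statement) =====
-- stated objective: alternative
-- what changed: Group-major single pass mutating a dict is replaced by a category-major staged computation: totals are precomputed once, then each of the four buckets is built independently by a filter-and-flatten comprehension over the totaled list, and the dict is assembled in one comprehension over the range table.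
import Mathlib
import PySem

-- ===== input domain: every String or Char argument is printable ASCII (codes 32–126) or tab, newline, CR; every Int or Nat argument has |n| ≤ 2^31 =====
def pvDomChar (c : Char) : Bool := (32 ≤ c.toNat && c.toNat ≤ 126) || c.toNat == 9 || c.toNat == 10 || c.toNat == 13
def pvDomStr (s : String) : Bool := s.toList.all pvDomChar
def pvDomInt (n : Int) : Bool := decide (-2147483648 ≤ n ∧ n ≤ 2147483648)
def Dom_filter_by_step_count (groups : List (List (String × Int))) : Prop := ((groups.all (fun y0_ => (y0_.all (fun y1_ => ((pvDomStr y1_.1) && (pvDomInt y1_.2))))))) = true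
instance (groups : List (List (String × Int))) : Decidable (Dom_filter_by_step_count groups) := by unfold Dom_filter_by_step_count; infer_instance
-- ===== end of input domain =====

-- B rebuilds the result category-by-category (precomputed totals, one filter-and-flatten per bucket) instead of A's group-major single pass mutating a dict (objective: alternative decomposition; same cost).


-- ===== PORT A =====
def filter_by_step_count (groups : List (List (String × Int))) : List (String × List (String × Int)) :=
  let categorized_stairs : PySem.Dict String (List (String × Int)) :=
    PySem.Dict.ofList [("150-200", []), ("200-250", []), ("250-300", []), ("300plus", [])]
  (groups.foldl (fun d group =>
    let total_steps : Int := (group.map (fun p => p.2)).sum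
    if 150 ≤ total_steps ∧ total_steps < 200 then d.modify "150-200" [] (· ++ group)
    else if 200 ≤ total_steps ∧ total_steps < 250 then d.modify "200-250" [] (· ++ group)
    else if 250 ≤ total_steps ∧ total_steps < 300 then d.modify "250-300" [] (· ++ group)
    else if 300 ≤ total_steps then d.modify "300plus" [] (· ++ group)
    else d) categorized_stairs).items

-- ===== PORT B =====
-- the range table ("150-200",150,200), …, ("300plus",300,None)
def pvRanges : List (String × Int × Option Int) :=
  [("150-200", 150, some 200), ("200-250", 200, some 250),
   ("250-300", 250, some 300), ("300plus", 300, none)]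

def filter_by_step_count_alt (groups : List (List (String × Int))) : List (String × List (String × Int)) :=
  -- totaled = [(sum(n for _, n in g), g) for g in groups]
  let totaled : List (Int × List (String × Int)) :=
    groups.map (fun group => ((group.map (fun p => p.2)).sum, group))
  -- {key: [stair for total, group in totaled if lo <= total and (hi is None or total < hi) for stair in group] for key, lo, hi in ranges}
  pvRanges.map (fun r =>
    (r.1, (totaled.filter (fun p =>
            decide (r.2.1 ≤ p.1) &&
            (match r.2.2 with | none => true | some hi => decide (p.1 < hi)))).flatMap (fun p => p.2)))

-- ===== PRECONDITION & SPEC =====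
def Spec_filter_by_step_count (groups : List (List (String × Int))) (out : List (String × List (String × Int))) : Prop := out = filter_by_step_count_alt groups
instance (groups : List (List (String × Int))) (out : List (String × List (String × Int))) : Decidable (Spec_filter_by_step_count groups out) := by unfold Spec_filter_by_step_count; infer_instance

-- ===== CLAIM =====
def Claim_equal_filter_by_step_count : Prop := ∀ (groups : List (List (String × Int))), Dom_filter_by_step_count groups → Spec_filter_by_step_count groups (filter_by_step_count groups)

-- ===== LEMMAS AND PROOFS =====

-- B's bucket for one range, starting from the total
def pvBucket (lo : Int) (hi : Option Int) (groups : List (List (String × Int))) : List (String × Int) :=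
  ((groups.map (fun group => ((group.map (fun p => p.2)).sum, group))).filter (fun p =>
      decide (lo ≤ p.1) && (match hi with | none => true | some h => decide (p.1 < h)))).flatMap (fun p => p.2)

theorem pvBucket_nil (lo : Int) (hi : Option Int) : pvBucket lo hi [] = [] := rfl

theorem pvBucket_cons_some (lo h : Int) (g : List (String × Int)) (gs : List (List (String × Int))) :
    pvBucket lo (some h) (g :: gs) =
      (if lo ≤ (g.map (fun p => p.2)).sum ∧ (g.map (fun p => p.2)).sum < h
       then g ++ pvBucket lo (some h) gs else pvBucket lo (some h) gs) := by
  simp only [pvBucket, List.map_cons, List.filter_cons]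
  split_ifs <;> simp_all

theorem pvBucket_cons_none (lo : Int) (g : List (String × Int)) (gs : List (List (String × Int))) :
    pvBucket lo none (g :: gs) =
      (if lo ≤ (g.map (fun p => p.2)).sum
       then g ++ pvBucket lo none gs else pvBucket lo none gs) := by
  simp only [pvBucket, List.map_cons, List.filter_cons]
  split_ifs <;> simp_all

-- A's fold, from a literal dict with the four keys, appends each range's bucket to its value
theorem pv_fold_invariant (gs : List (List (String × Int))) (v1 v2 v3 v4 : List (String × Int)) :
    gs.foldl (fun d group =>
      let total_steps : Int := (group.map (fun p => p.2)).sum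
      if 150 ≤ total_steps ∧ total_steps < 200 then d.modify "150-200" [] (· ++ group)
      else if 200 ≤ total_steps ∧ total_steps < 250 then d.modify "200-250" [] (· ++ group)
      else if 250 ≤ total_steps ∧ total_steps < 300 then d.modify "250-300" [] (· ++ group)
      else if 300 ≤ total_steps then d.modify "300plus" [] (· ++ group)
      else d)
      (PySem.Dict.mk [("150-200", v1), ("200-250", v2), ("250-300", v3), ("300plus", v4)]) =
    PySem.Dict.mk [("150-200", v1 ++ pvBucket 150 (some 200) gs),
                   ("200-250", v2 ++ pvBucket 200 (some 250) gs),
                   ("250-300", v3 ++ pvBucket 250 (some 300) gs),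
                   ("300plus", v4 ++ pvBucket 300 none gs)] := by
  induction gs generalizing v1 v2 v3 v4 with
  | nil => simp [pvBucket_nil]
  | cons g gs ih =>
    simp only [List.foldl_cons, pvBucket_cons_some, pvBucket_cons_none]
    set t : Int := (g.map (fun p => p.2)).sum with ht
    by_cases h1 : 150 ≤ t ∧ t < 200
    · have : (PySem.Dict.mk [("150-200", v1), ("200-250", v2), ("250-300", v3), ("300plus", v4)]).modify
          "150-200" [] (· ++ g) = PySem.Dict.mk [("150-200", v1 ++ g), ("200-250", v2), ("250-300", v3), ("300plus", v4)] := by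
        simp [PySem.Dict.modify, PySem.Dict.getD, PySem.Dict.get?, PySem.Dict.contains, PySem.Dict.insert]
      rw [if_pos h1, this, ih]
      have h2 : ¬(200 ≤ t ∧ t < 250) := by omega
      have h3 : ¬(250 ≤ t ∧ t < 300) := by omega
      have h4 : ¬(300 ≤ t) := by omega
      simp only [if_pos h1, if_neg h2, if_neg h3, if_neg h4, List.append_assoc]
    · by_cases h2 : 200 ≤ t ∧ t < 250
      · have : (PySem.Dict.mk [("150-200", v1), ("200-250", v2), ("250-300", v3), ("300plus", v4)]).modify
            "200-250" [] (· ++ g) = PySem.Dict.mk [("150-200", v1), ("200-250", v2 ++ g), ("250-300", v3), ("300plus", v4)] := by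
          simp [PySem.Dict.modify, PySem.Dict.getD, PySem.Dict.get?, PySem.Dict.contains, PySem.Dict.insert]
        rw [if_neg h1, if_pos h2, this, ih]
        have h3 : ¬(250 ≤ t ∧ t < 300) := by omega
        have h4 : ¬(300 ≤ t) := by omega
        simp only [if_neg h1, if_pos h2, if_neg h3, if_neg h4, List.append_assoc]
      · by_cases h3 : 250 ≤ t ∧ t < 300
        · have : (PySem.Dict.mk [("150-200", v1), ("200-250", v2), ("250-300", v3), ("300plus", v4)]).modify
              "250-300" [] (· ++ g) = PySem.Dict.mk [("150-200", v1), ("200-250", v2), ("250-300", v3 ++ g), ("300plus", v4)] := by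
            simp [PySem.Dict.modify, PySem.Dict.getD, PySem.Dict.get?, PySem.Dict.contains, PySem.Dict.insert]
          rw [if_neg h1, if_neg h2, if_pos h3, this, ih]
          have h4 : ¬(300 ≤ t) := by omega
          simp only [if_neg h1, if_neg h2, if_pos h3, if_neg h4, List.append_assoc]
        · by_cases h4 : 300 ≤ t
          · have : (PySem.Dict.mk [("150-200", v1), ("200-250", v2), ("250-300", v3), ("300plus", v4)]).modify
                "300plus" [] (· ++ g) = PySem.Dict.mk [("150-200", v1), ("200-250", v2), ("250-300", v3), ("300plus", v4 ++ g)] := by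
              simp [PySem.Dict.modify, PySem.Dict.getD, PySem.Dict.get?, PySem.Dict.contains, PySem.Dict.insert]
            rw [if_neg h1, if_neg h2, if_neg h3, if_pos h4, this, ih]
            simp only [if_neg h1, if_neg h2, if_neg h3, if_pos h4, List.append_assoc]
          · rw [if_neg h1, if_neg h2, if_neg h3, if_neg h4, ih]
            simp only [if_neg h1, if_neg h2, if_neg h3, if_neg h4]

-- ===== VERDICT =====
theorem filter_by_step_count_spec : Claim_equal_filter_by_step_count := by
  intro groups _
  show filter_by_step_count groups = filter_by_step_count_alt groups
  simp only [filter_by_step_count, filter_by_step_count_alt]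
  have hofList : PySem.Dict.ofList ([("150-200", ([] : List (String × Int))), ("200-250", []), ("250-300", []), ("300plus", [])]) =
      PySem.Dict.mk [("150-200", []), ("200-250", []), ("250-300", []), ("300plus", [])] := by decide
  rw [hofList, pv_fold_invariant]
  simp [pvRanges, pvBucket]
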